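-- pv_equiv track=rewrite | github.com/amanagarwal13/GenAI-hackathon-trip-planner | smart-weather-packing-agent/smart_packing_concierge/tools/weather.py | _get_weather_description
-- ===== SOURCE A (Python) =====
-- def _get_weather_description(destination: str, month: int, day: int) -> str:
--     """Get weather description based on location and season."""
--     destination_lower = destination.lower()
--
--     # Monsoon season
--     if month in [6, 7, 8, 9] and any(x in destination_lower for x in ['mumbai', 'kerala']):
--         descriptions = ["Heavy Rain", "Light Rain", "Cloudy", "Partly Cloudy"]
--         return descriptions[day % 4]
--
--     # Desert regions
--     elif any(x in destination_lower for x in ['rajasthan', 'jaipur']):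
--         descriptions = ["Sunny", "Clear", "Hot", "Partly Cloudy"]
--         return descriptions[day % 4]
--
--     # Mountain regions
--     elif any(x in destination_lower for x in ['himachal', 'kashmir']):
--         descriptions = ["Clear", "Cloudy", "Light Snow", "Partly Cloudy"]
--         return descriptions[day % 4]
--
--     # Default
--     descriptions = ["Sunny", "Partly Cloudy", "Cloudy", "Light Rain"]
--     return descriptions[day % 4]
-- ===== SOURCE B (Python) =====
-- # Priority-set re-implementation: collect the priorities of ALL matching keywords at once,
-- # pick the category as their minimum, and index one flat 16-entry table.
-- _PRIORITY = {"mumbai": 0, "kerala": 0, "rajasthan": 1, "jaipur": 1,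
--              "himachal": 2, "kashmir": 2}
-- _TABLE = ["Heavy Rain", "Light Rain", "Cloudy", "Partly Cloudy",
--           "Sunny", "Clear", "Hot", "Partly Cloudy",
--           "Clear", "Cloudy", "Light Snow", "Partly Cloudy",
--           "Sunny", "Partly Cloudy", "Cloudy", "Light Rain"]
--
-- def _get_weather_description(destination: str, month: int, day: int) -> str:
--     dest = destination.lower()
--     hits = {p for k, p in _PRIORITY.items() if k in dest}
--     if month not in (6, 7, 8, 9):
--         hits.discard(0)          # monsoon category only exists in monsoon months
--     cat = min(hits, default=3)   # smallest priority wins; 3 = default category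
--     return _TABLE[4 * cat + day % 4]
-- ===== Notes on version B (the rewrite author's own statement) =====
-- stated objective: alternative
-- what changed: Instead of an ordered if/elif scan, B collects the priorities of all matching keywords into a set, removes the monsoon priority outside monsoon months, takes the minimum (default 3), and indexes a single flat 16-entry table with 4*category + day%4.
import Mathlib
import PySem

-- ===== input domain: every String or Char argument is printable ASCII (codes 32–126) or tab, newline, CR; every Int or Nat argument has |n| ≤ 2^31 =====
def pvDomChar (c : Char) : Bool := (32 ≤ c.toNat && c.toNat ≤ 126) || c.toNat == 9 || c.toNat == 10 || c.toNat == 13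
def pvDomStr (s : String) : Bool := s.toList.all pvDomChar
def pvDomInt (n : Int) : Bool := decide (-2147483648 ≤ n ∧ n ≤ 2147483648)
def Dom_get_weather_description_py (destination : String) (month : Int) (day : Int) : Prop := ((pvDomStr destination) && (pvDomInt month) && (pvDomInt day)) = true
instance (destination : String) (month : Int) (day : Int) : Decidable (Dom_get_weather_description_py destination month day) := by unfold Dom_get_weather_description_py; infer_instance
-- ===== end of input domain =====

-- B replaces A's ordered if/elif scan by a min-priority computation over the set of all matching keywords plus one flat 16-entry table (objective: alternative, same cost).

-- ===== PORT A =====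
-- descriptions[day % 4]: 0 ≤ day % 4 < 4 in Python, so the .getD "" default branch is unreachable.
def get_weather_description_py (destination : String) (month : Int) (day : Int) : String :=
  let destination_lower := PySem.Str.lower destination
  if decide (month ∈ ([6, 7, 8, 9] : List Int)) &&
     (["mumbai", "kerala"].any fun x => PySem.Str.isIn x destination_lower) then
    (PySem.List.pyGet? ["Heavy Rain", "Light Rain", "Cloudy", "Partly Cloudy"] (PySem.Int.mod day 4)).getD ""
  else if ["rajasthan", "jaipur"].any (fun x => PySem.Str.isIn x destination_lower) then
    (PySem.List.pyGet? ["Sunny", "Clear", "Hot", "Partly Cloudy"] (PySem.Int.mod day 4)).getD ""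
  else if ["himachal", "kashmir"].any (fun x => PySem.Str.isIn x destination_lower) then
    (PySem.List.pyGet? ["Clear", "Cloudy", "Light Snow", "Partly Cloudy"] (PySem.Int.mod day 4)).getD ""
  else
    (PySem.List.pyGet? ["Sunny", "Partly Cloudy", "Cloudy", "Light Rain"] (PySem.Int.mod day 4)).getD ""

-- ===== PORT B =====
def pvPriority : List (String × Int) :=
  [("mumbai", 0), ("kerala", 0), ("rajasthan", 1), ("jaipur", 1), ("himachal", 2), ("kashmir", 2)]

def pvTable : List String :=
  ["Heavy Rain", "Light Rain", "Cloudy", "Partly Cloudy",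
   "Sunny", "Clear", "Hot", "Partly Cloudy",
   "Clear", "Cloudy", "Light Snow", "Partly Cloudy",
   "Sunny", "Partly Cloudy", "Cloudy", "Light Rain"]

-- min over the hit set: order-independent, so consuming the PySem.Set is exact.
def get_weather_description_py_alt (destination : String) (month : Int) (day : Int) : String :=
  let dest := PySem.Str.lower destination
  let hits : PySem.Set Int :=
    PySem.Set.ofList ((pvPriority.filter (fun kp => PySem.Str.isIn kp.1 dest)).map (·.2))
  let hits := if decide (month ∈ ([6, 7, 8, 9] : List Int)) then hits else PySem.Set.discard hits 0
  let cat := PySem.List.minD hits (fun x => x) 3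
  (PySem.List.pyGet? pvTable (4 * cat + PySem.Int.mod day 4)).getD ""

-- ===== PRECONDITION & SPEC =====
def Spec_get_weather_description_py (destination : String) (month : Int) (day : Int) (out : String) : Prop := out = get_weather_description_py_alt destination month day
instance (destination : String) (month : Int) (day : Int) (out : String) : Decidable (Spec_get_weather_description_py destination month day out) := by unfold Spec_get_weather_description_py; infer_instance

-- ===== CLAIM =====
def Claim_equal_get_weather_description_py : Prop := ∀ (destination : String) (month : Int) (day : Int), Dom_get_weather_description_py destination month day → Spec_get_weather_description_py destination month day (get_weather_description_py destination month day)

-- ===== LEMMAS AND PROOFS =====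

-- the hit set as a function of the six membership booleans
def pvHitsOf (b1 b2 b3 b4 b5 b6 : Bool) : PySem.Set Int :=
  PySem.Set.ofList ((if b1 then [(0:Int)] else []) ++ (if b2 then [0] else []) ++
                    (if b3 then [1] else []) ++ (if b4 then [1] else []) ++
                    (if b5 then [2] else []) ++ (if b6 then [2] else []))

theorem pvHits_eq (dest : String) :
    PySem.Set.ofList ((pvPriority.filter (fun kp => PySem.Str.isIn kp.1 dest)).map (·.2)) =
    pvHitsOf (PySem.Str.isIn "mumbai" dest) (PySem.Str.isIn "kerala" dest)
             (PySem.Str.isIn "rajasthan" dest) (PySem.Str.isIn "jaipur" dest)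
             (PySem.Str.isIn "himachal" dest) (PySem.Str.isIn "kashmir" dest) := by
  unfold pvPriority pvHitsOf
  congr 1
  simp only [List.filter]
  cases PySem.Str.isIn "mumbai" dest <;> cases PySem.Str.isIn "kerala" dest <;>
  cases PySem.Str.isIn "rajasthan" dest <;> cases PySem.Str.isIn "jaipur" dest <;>
  cases PySem.Str.isIn "himachal" dest <;> cases PySem.Str.isIn "kashmir" dest <;> rfl

-- the minimum of the hit set is exactly the priority of the first branch A takes
theorem pvMin_eq : ∀ (b1 b2 b3 b4 b5 b6 mB : Bool),
    PySem.List.minD (if mB then pvHitsOf b1 b2 b3 b4 b5 b6 else PySem.Set.discard (pvHitsOf b1 b2 b3 b4 b5 b6) 0) (fun x => x) 3 =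
    (if mB && (b1 || b2) then 0 else if b3 || b4 then 1 else if b5 || b6 then 2 else 3) := by
  decide

-- the flat table agrees with A's four lists
theorem pvTbl_eq : ∀ (c r : Int), (c = 0 ∨ c = 1 ∨ c = 2 ∨ c = 3) → (r = 0 ∨ r = 1 ∨ r = 2 ∨ r = 3) →
    (PySem.List.pyGet? pvTable (4 * c + r)).getD "" =
    (PySem.List.pyGet? (if c = 0 then ["Heavy Rain", "Light Rain", "Cloudy", "Partly Cloudy"]
                        else if c = 1 then ["Sunny", "Clear", "Hot", "Partly Cloudy"]
                        else if c = 2 then ["Clear", "Cloudy", "Light Snow", "Partly Cloudy"]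
                        else ["Sunny", "Partly Cloudy", "Cloudy", "Light Rain"]) r).getD "" := by
  intro c r hc hr
  rcases hc with rfl|rfl|rfl|rfl <;> rcases hr with rfl|rfl|rfl|rfl <;> rfl

-- ===== VERDICT =====
theorem get_weather_description_py_spec : Claim_equal_get_weather_description_py := by
  intro destination month day _
  unfold Spec_get_weather_description_py get_weather_description_py get_weather_description_py_alt
  dsimp only
  rw [pvHits_eq, pvMin_eq]
  have h0 : (0:Int) < 4 := by omega
  have hr0 := PySem.Int.mod_nonneg day h0
  have hr4 := PySem.Int.mod_lt day h0
  have hr : PySem.Int.mod day 4 = 0 ∨ PySem.Int.mod day 4 = 1 ∨ PySem.Int.mod day 4 = 2 ∨ PySem.Int.mod day 4 = 3 := by omega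
  simp only [List.any_cons, List.any_nil, Bool.or_false]
  by_cases hA : (decide (month ∈ ([6, 7, 8, 9] : List Int)) &&
      (PySem.Str.isIn "mumbai" (PySem.Str.lower destination) || PySem.Str.isIn "kerala" (PySem.Str.lower destination))) = true
  · rw [if_pos hA, if_pos hA, pvTbl_eq 0 _ (by omega) hr]
    simp
  · rw [if_neg hA, if_neg hA]
    by_cases hB : (PySem.Str.isIn "rajasthan" (PySem.Str.lower destination) || PySem.Str.isIn "jaipur" (PySem.Str.lower destination)) = true
    · rw [if_pos hB, if_pos hB, pvTbl_eq 1 _ (by omega) hr]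
      simp
    · rw [if_neg hB, if_neg hB]
      by_cases hC : (PySem.Str.isIn "himachal" (PySem.Str.lower destination) || PySem.Str.isIn "kashmir" (PySem.Str.lower destination)) = true
      · rw [if_pos hC, if_pos hC, pvTbl_eq 2 _ (by omega) hr]
        simp
      · rw [if_neg hC, if_neg hC, pvTbl_eq 3 _ (by omega) hr]
        simp
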